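-- pv_equiv track=rewrite | github.com/pypi-data/pypi-mirror-74 | packages/xlist/xlist-0.0.8.tar.gz/xlist-0.0.8/xlist/index.py | indexes_lst_not_slice
-- ===== SOURCE A (Python) =====
-- def indexes_lst_not_slice(ol,value):
--     length = ol.__len__()
--     end = None
--     slice = []
--     for i in range(length-1,-1,-1):
--         if(not(ol[i]==value)):
--             end = i
--             break
--         else:
--             pass
--     if(end == None):
--         return(None)
--     else:
--         slice.append(end)
--         for i in range(end-1,-1,-1):
--             if(not(ol[i]==value)):
--                 slice.append(i)
--             else:
--                 break
--     slice.reverse()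
--     return(slice)
-- ===== SOURCE B (Python) =====
-- def indexes_lst_not_slice(ol, value):
--     current = []
--     last = None
--     for i in range(len(ol)):
--         if not (ol[i] == value):
--             current.append(i)
--         else:
--             if current:
--                 last = current
--             current = []
--     if current:
--         last = current
--     return last
-- ===== Notes on version B (the rewrite author's own statement) =====
-- stated objective: simpler
-- what changed: Replaces A's two backward scans (find the end, then extend the run, then reverse) by one forward pass that keeps the current run of non-value indices and remembers the last completed run, so no reverse step is needed.
import Mathlib
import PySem

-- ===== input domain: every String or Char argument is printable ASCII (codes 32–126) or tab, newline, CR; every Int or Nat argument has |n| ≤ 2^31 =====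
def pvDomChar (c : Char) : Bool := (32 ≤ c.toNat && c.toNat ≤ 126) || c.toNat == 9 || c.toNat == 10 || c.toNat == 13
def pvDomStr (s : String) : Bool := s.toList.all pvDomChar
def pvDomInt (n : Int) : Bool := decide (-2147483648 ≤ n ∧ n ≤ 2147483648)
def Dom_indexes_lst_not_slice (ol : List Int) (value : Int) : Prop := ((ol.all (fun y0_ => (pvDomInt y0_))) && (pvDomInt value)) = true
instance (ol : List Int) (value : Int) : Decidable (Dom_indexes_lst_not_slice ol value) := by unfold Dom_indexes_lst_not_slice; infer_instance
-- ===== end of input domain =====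

-- B replaces A's two backward scans and final reverse by one forward pass keeping
-- the current run and the last completed run (objective: simpler).


-- ===== PORT A =====
-- first loop of A: for i in range(k-1,-1,-1): if not(ol[i]==value): end=i; break
def findEndA (ol : List Int) (value : Int) : Nat → Option Nat
  | 0 => none
  | n + 1 => if ol.getD n 0 = value then findEndA ol value n else some n

-- second loop of A: for i in range(e-1,-1,-1): append while not(ol[i]==value), break at first equal
def collectA (ol : List Int) (value : Int) : Nat → List Int
  | 0 => []
  | n + 1 => if ol.getD n 0 = value then [] else (n : Int) :: collectA ol value n

def indexes_lst_not_slice (ol : List Int) (value : Int) : Option (List Int) :=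
  match findEndA ol value ol.length with
  | none => none
  | some e => some (((e : Int) :: collectA ol value e).reverse)

-- ===== PORT B =====
-- one step of B's forward loop: extend the current run or commit it to `last`
def stepB (ol : List Int) (value : Int) (st : List Int × Option (List Int)) (i : Nat) :
    List Int × Option (List Int) :=
  if ol.getD i 0 = value then
    ([], if st.1 = [] then st.2 else some st.1)
  else
    (st.1 ++ [(i : Int)], st.2)

def indexes_lst_not_slice_alt (ol : List Int) (value : Int) : Option (List Int) :=
  let st := (List.range ol.length).foldl (stepB ol value) ([], none)
  if st.1 = [] then st.2 else some st.1

-- ===== PRECONDITION & SPEC =====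
def Spec_indexes_lst_not_slice (ol : List Int) (value : Int) (out : Option (List Int)) : Prop := out = indexes_lst_not_slice_alt ol value
instance (ol : List Int) (value : Int) (out : Option (List Int)) : Decidable (Spec_indexes_lst_not_slice ol value out) := by unfold Spec_indexes_lst_not_slice; infer_instance

-- ===== CLAIM (what is proved, stated in full; the proofs are below) =====
def Claim_equal_indexes_lst_not_slice : Prop := ∀ (ol : List Int) (value : Int), Dom_indexes_lst_not_slice ol value → Spec_indexes_lst_not_slice ol value (indexes_lst_not_slice ol value)

-- ===== LEMMAS AND PROOFS =====

theorem getD_concat_self (xs : List Int) (x : Int) : (xs ++ [x]).getD xs.length 0 = x := by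
  simp [List.getD]

theorem getD_concat_lt (xs : List Int) (x : Int) {n : Nat} (h : n < xs.length) :
    (xs ++ [x]).getD n 0 = xs.getD n 0 := by
  simp [List.getD, List.getElem?_append_left h]

theorem findEndA_concat (xs : List Int) (x value : Int) :
    ∀ k, k ≤ xs.length → findEndA (xs ++ [x]) value k = findEndA xs value k := by
  intro k
  induction k with
  | zero => intro _; rfl
  | succ n ih =>
    intro h
    have hn : n < xs.length := by omega
    simp only [findEndA, getD_concat_lt xs x hn, ih (Nat.le_of_lt hn)]

theorem collectA_concat (xs : List Int) (x value : Int) :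
    ∀ k, k ≤ xs.length → collectA (xs ++ [x]) value k = collectA xs value k := by
  intro k
  induction k with
  | zero => intro _; rfl
  | succ n ih =>
    intro h
    have hn : n < xs.length := by omega
    simp only [collectA, getD_concat_lt xs x hn, ih (Nat.le_of_lt hn)]

theorem findEndA_lt (ol : List Int) (value : Int) :
    ∀ k e, findEndA ol value k = some e → e < k := by
  intro k
  induction k with
  | zero => intro e h; simp [findEndA] at h
  | succ n ih =>
    intro e h
    simp only [findEndA] at h
    split at h
    · exact Nat.lt_succ_of_lt (ih e h)
    · simp only [Option.some.injEq] at h; omega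

theorem foldl_stepB_concat (xs : List Int) (x value : Int) :
    ∀ (l : List Nat), (∀ i ∈ l, i < xs.length) → ∀ st,
      l.foldl (stepB (xs ++ [x]) value) st = l.foldl (stepB xs value) st := by
  intro l
  induction l with
  | nil => intro _ st; rfl
  | cons a t ih =>
    intro h st
    simp only [List.foldl_cons]
    rw [show stepB (xs ++ [x]) value st a = stepB xs value st a by
      simp only [stepB, getD_concat_lt xs x (h a (by simp))]]
    exact ih (fun i hi => h i (by simp [hi])) _

theorem invB (value : Int) (xs : List Int) :
    ((List.range xs.length).foldl (stepB xs value) ([], none)).1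
        = (collectA xs value xs.length).reverse ∧
    (if ((List.range xs.length).foldl (stepB xs value) ([], none)).1 = []
        then ((List.range xs.length).foldl (stepB xs value) ([], none)).2
        else some ((List.range xs.length).foldl (stepB xs value) ([], none)).1)
      = indexes_lst_not_slice xs value := by
  induction xs using List.reverseRecOn with
  | nil => simp [collectA, indexes_lst_not_slice, findEndA]
  | append_singleton xs x ih =>
    obtain ⟨ih1, ih2⟩ := ih
    have hlen : (xs ++ [x]).length = xs.length + 1 := by simp
    have hfold :
        (List.range (xs ++ [x]).length).foldl (stepB (xs ++ [x]) value) ([], none)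
          = stepB (xs ++ [x]) value
              ((List.range xs.length).foldl (stepB xs value) ([], none)) xs.length := by
      rw [hlen, List.range_succ, List.foldl_append,
        foldl_stepB_concat xs x value _ (fun i hi => List.mem_range.mp hi)]
      rfl
    set st := (List.range xs.length).foldl (stepB xs value) ([], none) with hst
    by_cases hx : x = value
    · -- last element equals value: run resets, answer unchanged
      subst hx
      have hstep : stepB (xs ++ [x]) x st xs.length
          = ([], if st.1 = [] then st.2 else some st.1) := by
        simp [stepB, getD_concat_self]
      have h1 : findEndA (xs ++ [x]) x ((xs ++ [x]).length) = findEndA xs x xs.length := by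
        simp [hlen, findEndA, getD_concat_self, findEndA_concat xs x x xs.length le_rfl]
      have hA : indexes_lst_not_slice (xs ++ [x]) x = indexes_lst_not_slice xs x := by
        unfold indexes_lst_not_slice
        rw [h1]
        cases he : findEndA xs x xs.length with
        | none => rfl
        | some e =>
          have hlt := findEndA_lt xs x xs.length e he
          simp [collectA_concat xs x x e (Nat.le_of_lt hlt)]
      refine ⟨?_, ?_⟩
      · rw [hfold, hstep]
        simp [collectA, hlen, getD_concat_self]
      · rw [hfold, hstep, hA, ← ih2]
        simp
    · -- last element differs: run extends by index xs.length
      have hstep : stepB (xs ++ [x]) value st xs.length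
          = (st.1 ++ [(xs.length : Int)], st.2) := by
        simp [stepB, getD_concat_self, hx]
      have hcol : collectA (xs ++ [x]) value ((xs ++ [x]).length)
          = (xs.length : Int) :: collectA xs value xs.length := by
        simp [hlen, collectA, getD_concat_self, hx,
          collectA_concat xs x value xs.length le_rfl]
      have hA : indexes_lst_not_slice (xs ++ [x]) value
          = some (((xs.length : Int) :: collectA xs value xs.length).reverse) := by
        unfold indexes_lst_not_slice
        simp [hlen, findEndA, getD_concat_self, hx,
          collectA_concat xs x value xs.length le_rfl]
      refine ⟨?_, ?_⟩
      · rw [hfold, hstep, hcol]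
        simp [ih1]
      · rw [hfold, hstep, hA]
        simp [ih1]

-- ===== VERDICT (by name: the statement is the Claim_ definition above) =====
theorem indexes_lst_not_slice_spec : Claim_equal_indexes_lst_not_slice := by
  intro ol value _
  unfold Spec_indexes_lst_not_slice indexes_lst_not_slice_alt
  exact ((invB value ol).2).symm
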